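-- pv_equiv track=rewrite | github.com/taylorhall356/Distributed-Semantic-Retrieval-System | documents.py | is_body_heading
-- ===== SOURCE A (Python) =====
-- def is_body_heading(text: str) -> bool:
--     lowered = text.strip().lower()
--     return any(
--         phrase in lowered
--         for phrase in (
--             "executive summary",
--             "introduction",
--             "background",
--             "methodology",
--             "findings",
--             "discussion",
--             "policy",
--             "conclusion",
--             "technical requirements",
--             "api specification",
--             "system architecture",
--             "performance evaluation",
--             "deliverables",
--         )
--     )
-- ===== SOURCE B (Python) =====
-- _HEADING_PHRASES = (
--     "executive summary",
--     "introduction",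
--     "background",
--     "methodology",
--     "findings",
--     "discussion",
--     "policy",
--     "conclusion",
--     "technical requirements",
--     "api specification",
--     "system architecture",
--     "performance evaluation",
--     "deliverables",
-- )
--
--
-- def is_body_heading(text: str) -> bool:
--     # Single left-to-right position scan: at each position check whether some
--     # phrase starts there, instead of 13 independent full-text substring searches.
--     s = text.strip().lower()
--     for i in range(len(s) + 1):
--         if any(s.startswith(p, i) for p in _HEADING_PHRASES):
--             return True
--     return False
-- ===== Notes on version B (the rewrite author's own statement) =====
-- stated objective: alternative
-- what changed: Thirteen independent full-text substring searches are replaced by one left-to-right position scan that tests at each position whether some heading phrase starts there.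
import Mathlib
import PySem

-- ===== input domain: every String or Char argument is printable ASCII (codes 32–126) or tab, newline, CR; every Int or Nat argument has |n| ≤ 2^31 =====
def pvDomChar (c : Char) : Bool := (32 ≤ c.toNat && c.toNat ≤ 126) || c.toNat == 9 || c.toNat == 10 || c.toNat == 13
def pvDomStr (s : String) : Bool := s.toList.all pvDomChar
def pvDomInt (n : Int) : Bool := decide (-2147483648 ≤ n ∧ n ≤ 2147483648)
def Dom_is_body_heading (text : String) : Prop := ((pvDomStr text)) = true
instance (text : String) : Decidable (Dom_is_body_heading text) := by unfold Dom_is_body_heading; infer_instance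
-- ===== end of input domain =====

-- B is an alternative implementation: one left-to-right scan testing at each
-- position whether some heading phrase starts there, instead of A's 13
-- independent substring searches.

-- ===== PORT A =====
-- the tuple of phrases A iterates over, in order
def pvPhrasesA : List String :=
  ["executive summary", "introduction", "background", "methodology",
   "findings", "discussion", "policy", "conclusion",
   "technical requirements", "api specification", "system architecture",
   "performance evaluation", "deliverables"]

def is_body_heading (text : String) : Bool :=
  let lowered := PySem.Str.lower (PySem.Str.strip text)
  pvPhrasesA.any (fun phrase => PySem.Str.isIn phrase lowered)

-- ===== PORT B =====
-- the same module-level phrase tuple, as char lists (B scans char by char)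
def pvPhrasesB : List (List Char) :=
  ["executive summary".toList, "introduction".toList, "background".toList,
   "methodology".toList, "findings".toList, "discussion".toList,
   "policy".toList, "conclusion".toList, "technical requirements".toList,
   "api specification".toList, "system architecture".toList,
   "performance evaluation".toList, "deliverables".toList]

-- B's position loop: for i = 0..len(s), if some phrase starts at position i
-- return True, else False. s.startswith(p, i) is exactly a prefix test on the
-- i-th suffix, so the loop is transcribed as recursion over the suffixes of s.
def pvScan (P : List (List Char)) : List Char → Bool
  | [] => if P.any (fun p => PySem.Chars.startswith [] p) then true else false
  | c :: t =>
    if P.any (fun p => PySem.Chars.startswith (c :: t) p) then true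
    else pvScan P t

def is_body_heading_alt (text : String) : Bool :=
  pvScan pvPhrasesB (PySem.Str.lower (PySem.Str.strip text)).toList

-- ===== PRECONDITION & SPEC =====
def Spec_is_body_heading (text : String) (out : Bool) : Prop := out = is_body_heading_alt text
instance (text : String) (out : Bool) : Decidable (Spec_is_body_heading text out) := by unfold Spec_is_body_heading; infer_instance

-- ===== CLAIM (what is proved, stated in full; the proofs are below) =====
def Claim_equal_is_body_heading : Prop := ∀ (text : String), Dom_is_body_heading text → Spec_is_body_heading text (is_body_heading text)

-- ===== LEMMAS AND PROOFS =====

-- B's scan finds exactly the phrases occurring as an infix of s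
theorem pvScan_eq_true_iff (P : List (List Char)) (s : List Char) :
    pvScan P s = true ↔ ∃ p ∈ P, p <:+: s := by
  induction s with
  | nil =>
    simp [pvScan, PySem.Chars.startswith_iff, List.any_eq_true]
  | cons c t ih =>
    rw [pvScan]
    by_cases h : P.any (fun p => PySem.Chars.startswith (c :: t) p) = true
    · simp only [h, if_true, true_iff]
      simp only [List.any_eq_true, PySem.Chars.startswith_iff] at h
      obtain ⟨p, hp, hpre⟩ := h
      exact ⟨p, hp, hpre.isInfix⟩
    · rw [if_neg h, ih]
      constructor
      · rintro ⟨p, hp, hinf⟩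
        exact ⟨p, hp, List.infix_cons_iff.mpr (Or.inr hinf)⟩
      · rintro ⟨p, hp, hinf⟩
        rcases (List.infix_cons_iff.mp hinf) with hpre | htail
        · exact absurd (by simp only [List.any_eq_true]; exact ⟨p, hp, (PySem.Chars.startswith_iff _ _).mpr hpre⟩) h
        · exact ⟨p, hp, htail⟩

theorem pvPhrasesB_eq : pvPhrasesB = pvPhrasesA.map String.toList := by decide

theorem is_body_heading_eq (text : String) :
    is_body_heading text = is_body_heading_alt text := by
  unfold is_body_heading is_body_heading_alt
  rw [Bool.eq_iff_iff, pvScan_eq_true_iff, pvPhrasesB_eq]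
  simp only [List.any_eq_true, PySem.Str.isIn_iff_infix, List.mem_map]
  constructor
  · rintro ⟨p, hp, h⟩
    exact ⟨p.toList, ⟨p, hp, rfl⟩, h⟩
  · rintro ⟨q, ⟨p, hp, rfl⟩, h⟩
    exact ⟨p, hp, h⟩

-- ===== VERDICT (by name: the statement is the Claim_ definition above) =====
theorem is_body_heading_spec : Claim_equal_is_body_heading := by
  intro text _
  exact is_body_heading_eq text
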